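/- GENERATED by mk_final_copies.py from the proof of the farm's unit `start_decoder.C5d` (farm:start_decoder.C5d.1: Proof.lean) as the
   re-elaboration sweep compiled it — do not edit. -/
import Asan.CheckWalk
import Vorbis.Spec.Reader
import Vorbis.Spec.StartDecoderC4
import Vorbis.Spec.Units.start_decoder_C5d

open X86 X86.User Asan Vorbis Vorbis.Spec Vorbis.Spec.StartDecoder

set_option maxRecDepth 4000
set_option maxHeartbeats 4000000

namespace Vorbis.Spec.start_decoder_C5d

/-- **The fields of the struct at `c` other than `sparse` read the same in two memories** that agree on `[c, c + 27)` and
`[c + 28, c + 2120)`: what the byte store `c->sparse = 0` (0x11464c) leaves alone. (`BookFields` of the carry layer contains `sparse`,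
so it is false over this store.) -/
structure C5dFields (m m' : Mem) (c : Nat) : Prop where
  dimensions : Codebook.dimensions m' c = Codebook.dimensions m c
  entries : Codebook.entries m' c = Codebook.entries m c
  codeword_lengths : Codebook.codeword_lengths m' c = Codebook.codeword_lengths m c
  lookup_type : Codebook.lookup_type m' c = Codebook.lookup_type m c
  lookup_values : Codebook.lookup_values m' c = Codebook.lookup_values m c
  multiplicands : Codebook.multiplicands m' c = Codebook.multiplicands m c
  codewords : Codebook.codewords m' c = Codebook.codewords m c
  sorted_codewords : Codebook.sorted_codewords m' c = Codebook.sorted_codewords m c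
  sorted_values : Codebook.sorted_values m' c = Codebook.sorted_values m c
  sorted_entries : Codebook.sorted_entries m' c = Codebook.sorted_entries m c

/-- `C5dFields` from the two kept parts of the struct. -/
theorem C5dFields.of_eqOn {m m' : Mem} {c : Nat} (hc : c + 2120 ≤ 2 ^ 64) (b1 : Mem.EqOn c (c + 27) m m')
    (b2 : Mem.EqOn (c + 28) (c + 2120) m m') : C5dFields m m' c := by
  constructor
  · simp only [vacc, voff]
    exact b1.i32 _ (by omega) (by omega) (by omega)
  · simp only [vacc, voff]
    exact b1.i32 _ (by omega) (by omega) (by omega)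
  · simp only [vacc, voff]
    exact b1.u64 _ (by omega) (by omega) (by omega)
  · simp only [vacc, voff]
    exact b1.u8 _ (by omega) (by omega) (by omega)
  · simp only [vacc, voff]
    exact b2.u32 _ (by omega) (by omega) (by omega)
  · simp only [vacc, voff]
    exact b2.u64 _ (by omega) (by omega) (by omega)
  · simp only [vacc, voff]
    exact b2.u64 _ (by omega) (by omega) (by omega)
  · simp only [vacc, voff]
    exact b2.u64 _ (by omega) (by omega) (by omega)
  · simp only [vacc, voff]
    exact b2.u64 _ (by omega) (by omega) (by omega)
  · simp only [vacc, voff]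
    exact b2.i32 _ (by omega) (by omega) (by omega)

/-- **Segment C5d of `start_decoder`** (`cut112` 0x114636 … `loop10` 0x11484a), walked: the checked load `rbx = c->codeword_lengths`
(0x11463f), the checked byte store `c->sparse = 0` (0x11464c), the checked load of the same byte into `r13d` (0x11465a, read back as
0, so `je 0x11483c` is taken), `r12d = d[R+24H]` = 0 (Z24), `ebp = r12d`: `In5L` at the head of loop 3818 with `j = 0`,
`lengths := c->codeword_lengths`, the dense branch of `LengthsAt`. The memory changes by the three return addresses of the check
calls (below `R`) and the byte `[c + 27, c + 28)` of the struct: `Frame.step` / `Cur.step` of the carry layer. -/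
theorem segC5d_walk {Lay : Layout} (hLay : Lay.hi = 0x1000000) {μ : Microarch} (hμ : UserX.MicroOK μ) {u₀ : State}
    (hcode : HasCodeNat Lay u₀ Vorbis.L.start_decoder.entry Vorbis.Code.code_start_decoder.nat Vorbis.L.start_decoder.size)
    (hld1 : Asan.SmallCheck Lay μ Vorbis.WayInv (Vorbis.CodeOK u₀) [.rax, .rdx] 1 Vorbis.L.__asan_load1_noabort.entry)
    (hld8 : Asan.SmallCheck Lay μ Vorbis.WayInv (Vorbis.CodeOK u₀) [.rax, .rcx, .rdx] 8 Vorbis.L.__asan_load8_noabort.entry)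
    (hst1 : Asan.SmallCheck Lay μ Vorbis.WayInv (Vorbis.CodeOK u₀) [.rax, .rdx] 1 Vorbis.L.__asan_store1_noabort.entry)
    {g : Ghost} {i : Nat} {A2 A3 Ai : Arena} {A : Arena × List Obj} {v : State}
    (hat : In5O u₀ g i A2 A3 Ai A v) :
    ReachVia Lay μ WayInv v (fun w => ∃ e, At5L u₀ g i e 0 w) := by
  -- 1. the entry state's facts
  have hfr := hat.frame
  have he := hfr.entry
  v_entry he
  simp only [depth] at he_room he_stack
  -- 2. the present state's facts
  have w_rip := hfr.rip
  obtain ⟨hr1, hr2⟩ := hfr.r_eq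
  simp only [steady] at hr1
  have hRA : g.RA = (g.e.reg .rsp).toNat := rfl
  have c_rsp : v.reg .rsp = g.e.reg .rsp - 1480 := by
    rw [hfr.rsp]
    refine (eq_addr _ _ ?_).symm
    unfold Ghost.R Ghost.RA steady
    u_omega
  -- the struct `c = cb(i)`: inside the codebooks block, a setup block of the arena
  have hpos : Pos g A := Pos.of hfr hat.cur
  have hm0 : MInv g i A2 A3 Ai A v.mem := MInv.of hfr hat.cur
  have hcw := hm0.c_where
  have ha := hat.cur.sd.arena
  have hcb := hat.cur.ages.cbOK
  have hBA : A.1.Blk (codebooksBlock v.mem g.f) := hcb.F2.mono hat.cur.ages.exti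
  have hcin := hcb.cb_in i hat.cur.lt
  simp only [vblock, Off.sizeof.Codebook] at hcin
  have hcdef : stb_vorbis.codebooks_at v.mem g.f i = g.cb v.mem i := rfl
  rw [hcdef] at hcin
  have c_r14n : (v.reg .r14).toNat = g.cb v.mem i := by
    rw [hat.cur.r14]
    exact toNat_addr _ (by omega)
  have hBA' : A.1.Block (stb_vorbis.codebooks v.mem g.f) (2120 * (stb_vorbis.codebook_count v.mem g.f).toNat) := hBA
  have htx := hat.cur.hand.arenaText
  simp only [Vorbis.L.textHi] at htx
  have e8 : v.reg .r14 + 8 = addr (g.cb v.mem i + 8) := by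
    rw [hat.cur.r14]
    exact Vorbis.addr_add_lit _ 8
  have t8 : (v.reg .r14 + 8).toNat = g.cb v.mem i + 8 := by
    rw [e8]
    exact toNat_addr _ (by omega)
  have e27 : v.reg .r14 + 27 = addr (g.cb v.mem i + 27) := by
    rw [hat.cur.r14]
    exact Vorbis.addr_add_lit _ 27
  have t27 : (v.reg .r14 + 27).toNat = g.cb v.mem i + 27 := by
    rw [e27]
    exact toNat_addr _ (by omega)
  have t1 : (g.e.reg .rsp - 1488).toNat = (g.e.reg .rsp).toNat - 1488 := by u_omega
  have w_eq : Mem.EqOn Vorbis.L.textLo Vorbis.L.textHi u₀.mem v.mem := hfr.code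
  have hdf : v.flags .df = false := (show abiInv _ from hfr.inv).1
  have hmx : v.mxcsr &&& 0x1F80 = 0x1F80 := (show abiInv _ from hfr.inv).2
  have hsse := Vorbis.sseOK_of_abiInv hfr.inv
  -- 3. the slot the segment loads: `d[R+24H]` = 0 (Z24), in the walker's spelling
  have hslot0 : v.mem.readLE (g.e.reg .rsp - 1444) 4 = 0 := by
    have hz := hat.cur.sd.frame.z24 (by omega) (by omega)
    have ea : g.e.reg .rsp - 1444 = addr (g.R + 0x24) := by
      refine eq_addr _ _ ?_
      unfold Ghost.R Ghost.RA steady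
      u_omega
    rw [ea]
    exact hz
  -- 4. the walk
  u_walk hcode [hμ.vendor]
    until [Vorbis.L.start_decoder.loop10] span [Vorbis.L.textLo, Vorbis.L.textHi] side (v_side)
  case check_11463a =>
    -- 0x11463a, line 3808: `c->codeword_lengths`, 8 bytes at `c + 8` inside the codebooks block
    have hun : ShadowUntouched v.mem s_11463a.mem := by v_untouched
    have hsh' := hfr.shadow.untouched hun
    refine ⟨hsh'.sealed, ?_⟩
    rw [t8]
    exact ha.block_acc_inv hsh' hBA' (by omega) (by omega) (by decide)
  case check_114647 =>
    -- 0x114647, line 3809: the store `c->sparse = 0`, 1 byte at `c + 27`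
    have hun : ShadowUntouched v.mem s_114647.mem := by v_untouched
    have hsh' := hfr.shadow.untouched hun
    refine ⟨hsh'.sealed, ?_⟩
    rw [t27]
    exact ha.block_acc_inv hsh' hBA' (by omega) (by omega) (by decide)
  case check_114655 =>
    -- 0x114655, line 3813: the load of `c->sparse`, after the store into the struct (no shadow byte written)
    have hun : ShadowUntouched v.mem s_114655.mem := by v_untouched
    have hsh' := hfr.shadow.untouched hun
    refine ⟨hsh'.sealed, ?_⟩
    rw [t27]
    exact ha.block_acc_inv hsh' hBA' (by omega) (by omega) (by decide)
  -- 5. the exit `loop10` 0x11484a: `In5L` with `j = 0`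
  -- what was written: three return addresses at `[R - 8, R)` and the byte `[c + 27, c + 28)` of the struct
  have hwin : ∃ w ∈ [(⟨g.R - 408, g.R⟩ : Span), ⟨g.cb v.mem i + 27, g.cb v.mem i + 28⟩],
      w.lo ≤ (g.e.reg .rsp - 1488).toNat ∧ (g.e.reg .rsp - 1488).toNat + 8 ≤ w.hi := by
    refine ⟨⟨g.R - 408, g.R⟩, List.mem_cons_self, ?_, ?_⟩
    · rw [t1]
      show g.R - 408 ≤ _
      omega
    · rw [t1]
      show _ ≤ g.R
      omega
  have hwrap : (g.e.reg .rsp - 1488).toNat + 8 < 2 ^ 64 := by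
    rw [t1]
    omega
  have hsame : Mem.SameExcept [⟨g.R - 408, g.R⟩, ⟨g.cb v.mem i + 27, g.cb v.mem i + 28⟩] v.mem s_114844.mem := by
    rw [w_mem]
    refine Mem.SameExcept.step_writeLE _ 8 _ ?_ hwrap hwin
    refine Mem.SameExcept.step_writeLE _ 1 _ ?_ ?_ ?_
    · exact Mem.SameExcept.writeLE _ v.mem _ 8 _ hwrap hwin
    · rw [t27]
      omega
    · refine ⟨⟨g.cb v.mem i + 27, g.cb v.mem i + 28⟩, List.mem_cons_of_mem _ List.mem_cons_self, ?_, ?_⟩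
      · rw [t27]
        exact Nat.le_refl _
      · rw [t27]
        exact Nat.le_refl _
  have hq0 : ∀ x, x ∈ [(⟨g.R - 408, g.R⟩ : Span), ⟨g.cb v.mem i + 27, g.cb v.mem i + 28⟩] →
      OkWin0 g (g.cb v.mem i) x := by
    intro x hx
    simp only [List.mem_cons, List.mem_nil_iff, or_false] at hx
    unfold OkWin0
    rcases hx with rfl | rfl
    · exact Or.inl ⟨Nat.le_refl _, Nat.le_refl _⟩
    · refine Or.inr (Or.inr (Or.inr (Or.inl ⟨?_, ?_⟩)))
      · show g.cb v.mem i ≤ g.cb v.mem i + 27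
        omega
      · show g.cb v.mem i + 28 ≤ g.cb v.mem i + 2120
        omega
  have hun : ShadowUntouched v.mem s_114844.mem := by v_untouched
  have hb : Bits (g.Blk A) g.len s_114844.mem g.f := by
    apply bits_kept hpos hm0.sd.bits hsame
    intro x hx
    simp only [List.mem_cons, List.mem_nil_iff, or_false] at hx
    rcases hx with rfl | rfl
    · refine Or.inl ⟨Nat.le_refl _, ?_⟩
      show g.R ≤ g.R + 0x598
      omega
    · refine Or.inr (Or.inl ⟨?_, ?_⟩)
      · show A.1.B ≤ g.cb v.mem i + 27
        omega
      · show g.cb v.mem i + 28 ≤ A.1.B + A.1.L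
        omega
  have habi : abiInv s_114844 := by
    refine Vorbis.abiInv_of ?_ ?_
    · rw [w_flags]
      simp only [X86.User.df_setStatus]
      exact w_df_114655
    · rw [w_mxcsr]
      exact hmx
  have hrsp : s_114844.reg .rsp = v.reg .rsp := by
    rw [w_rsp, c_rsp]
  -- `Frame` and `Cur` at the loop head, by the carry layer
  have hF : Frame u₀ g Vorbis.L.start_decoder.loop10 A s_114844 :=
    Frame.step hfr hat.cur hsame hun (fun x hx => (hq0 x hx).ok) hb w_rip hrsp w_eq habi
  obtain ⟨hC, hcbe⟩ := Cur.step hfr hat.cur hsame hun (fun x hx => (hq0 x hx).ok) hb (w_kept .r14 rfl)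
  -- the fields of the struct: all but `sparse` are kept, `sparse` is the 0 just stored
  have hb1 : Mem.EqOn (g.cb v.mem i) (g.cb v.mem i + 27) v.mem s_114844.mem := by
    apply hsame.eqOn
    intro x hx
    simp only [List.mem_cons, List.mem_nil_iff, or_false] at hx
    rcases hx with rfl | rfl
    · show g.cb v.mem i + 27 ≤ g.R - 408 ∨ g.R ≤ g.cb v.mem i
      omega
    · show g.cb v.mem i + 27 ≤ g.cb v.mem i + 27 ∨ _
      exact Or.inl (Nat.le_refl _)
  have hb2 : Mem.EqOn (g.cb v.mem i + 28) (g.cb v.mem i + 2120) v.mem s_114844.mem := by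
    apply hsame.eqOn
    intro x hx
    simp only [List.mem_cons, List.mem_nil_iff, or_false] at hx
    rcases hx with rfl | rfl
    · show g.cb v.mem i + 2120 ≤ g.R - 408 ∨ g.R ≤ g.cb v.mem i + 28
      omega
    · show _ ∨ g.cb v.mem i + 28 ≤ g.cb v.mem i + 28
      exact Or.inr (Nat.le_refl _)
  have hsf : C5dFields v.mem s_114844.mem (g.cb v.mem i) := C5dFields.of_eqOn (by omega) hb1 hb2
  have hsp0 : Codebook.sparse s_114844.mem (g.cb v.mem i) = 0 := by
    simp only [vacc, voff]
    show s_114844.mem.readLE (addr (g.cb v.mem i + 27)) 1 = 0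
    rw [w_mem, ← e27]
    rw [Mem.readLE_writeLE_disjoint_noWrap]
    · exact Mem.readLE_writeLE_same _ _ 1 0 (by omega)
    · show (g.e.reg .rsp - 1488).toNat + 8 ≤ 2 ^ 64
      omega
    · show (v.reg .r14 + 27).toNat + 1 ≤ 2 ^ 64
      omega
    · rw [t27, t1]
      omega
  -- the bytes of the `lengths` array: a block allocated since `Ai`, off the struct and the stack
  have hlen : (Block.mk (Codebook.codeword_lengths v.mem (g.cb v.mem i))
      (Codebook.entries v.mem (g.cb v.mem i)).toNat).Kept v.mem s_114844.mem :=
    young_kept0 hm0 hpos hsame hq0 hat.block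
  have hnn := hat.k1.ent_nonneg
  refine ReachVia.done ⟨Codebook.entries s_114844.mem (g.cb s_114844.mem i), A,
    Codebook.codeword_lengths v.mem (g.cb v.mem i), A2, A3, Ai, ?_⟩
  exact
    { frame := hF
      cur := hC
      k1 := by
        rw [hcbe]
        exact ⟨by rw [hsf.dimensions]; exact hat.k1.dim_pos, by rw [hsf.dimensions]; exact hat.k1.dim_le,
          by rw [hsf.entries]; exact hat.k1.ent_nonneg, by rw [hsf.entries]; exact hat.k1.ent_lt⟩
      sparse0 := by
        rw [hcbe]
        exact hsp0
      r13 := by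
        rw [hcbe, hsp0, w_r13]
        rfl
      rbx := by
        rw [w_rbx, e8]
        rfl
      lenL := by
        rw [hcbe, hsf.entries]
        exact hat.lenL.same hlen.same hlen.inside
      place := by
        rw [hcbe]
        exact
          { sparse_01 := Or.inl hsp0
            sparse_temp := fun h1 => by rw [hsp0] at h1; exact absurd h1 (by decide)
            sparse_null := fun h1 => by rw [hsp0] at h1; exact absurd h1 (by decide)
            dense_block := fun _ => by rw [hsf.entries]; exact hat.block
            dense_eq := fun _ => hsf.codeword_lengths.symm
            dense_temps := fun _ => hat.noTemps }
      fresh := by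
        rw [hcbe]
        exact ⟨⟨⟨by rw [hsf.lookup_type]; exact hat.fresh.lookup_type, by rw [hsf.lookup_values]; exact hat.fresh.lookup_values,
          by rw [hsf.multiplicands]; exact hat.fresh.multiplicands⟩,
          by rw [hsf.sorted_codewords]; exact hat.fresh.sorted_codewords, by rw [hsf.sorted_values]; exact hat.fresh.sorted_values⟩,
          by rw [hsf.codewords]; exact hat.fresh.codewords, by rw [hsf.sorted_entries]; exact hat.fresh.sorted_entries⟩
      r12 := by
        rw [w_r12]
        rfl
      j_le := by
        rw [hcbe, hsf.entries]
        exact hnn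
      rbp := by
        rw [w_rbp]
        rfl
      e_eq := rfl }

end Vorbis.Spec.start_decoder_C5d

/-- The unit `start_decoder.C5d`: `segC5d_walk` at every entry state. -/
theorem Vorbis.Spec.Worked.start_decoder_C5d_ok : Vorbis.Spec.start_decoder_C5d.Statement := by
  intro Lay hLay μ hμ u₀ hcode hld1 hld8 hst1 g i v hat
  obtain ⟨A, A2, A3, Ai, h⟩ := hat
  exact Vorbis.Spec.start_decoder_C5d.segC5d_walk hLay hμ hcode hld1 hld8 hst1 h
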